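-- pv_equiv track=rewrite | github.com/lily-ysw/credit_card_risk_analysis | backend/api/fix_credit_card_data.py | create_credit_card_risk_labels
-- ===== SOURCE A (Python) =====
-- CREDIT_CARD_CATEGORIES = {
--     'Cards and CVV': 'Critical',
--     'Carding': 'Critical',
--     'SSN': 'Critical',
--     'Dump': 'Critical',
--     'Drop Bank': 'High',
--     'Physical Drop': 'High'
-- }
--
-- def create_credit_card_risk_labels(title, description, category, price, keywords):
--     """Create risk labels specifically for credit card related listings using keyword files"""
--     text = f"{title} {description} {category}".lower()
--
--     # Check if it's a known credit card category first
--     if category in CREDIT_CARD_CATEGORIES: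
--         base_risk = CREDIT_CARD_CATEGORIES[category]
--
--         # Check for critical risk keywords first
--         for keyword in keywords['critical']:
--             if keyword.lower() in text:
--                 return 'Critical'
--
--         # Check for high risk keywords
--         for keyword in keywords['high']:
--             if keyword.lower() in text:
--                 return 'High' if base_risk == 'Medium' else base_risk
--
--         return base_risk
--
--     # For non-credit card categories, use keyword analysis
--     # Check for critical risk keywords first
--     for keyword in keywords['critical']:
--         if keyword.lower() in text:
--             return 'Critical'
--
--     # Check for high risk keywords
--     for keyword in keywords['high']:
--         if keyword.lower() in text:
--             return 'High'
--
--     # Check for medium risk keywords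
--     for keyword in keywords['medium']:
--         if keyword.lower() in text:
--             return 'Medium'
--
--     # Check for low risk keywords
--     for keyword in keywords['low']:
--         if keyword.lower() in text:
--             return 'Low'
--
--     return 'Low'
-- ===== SOURCE B (Python) =====
-- CREDIT_CARD_CATEGORIES = {
--     'Cards and CVV': 'Critical',
--     'Carding': 'Critical',
--     'SSN': 'Critical',
--     'Dump': 'Critical',
--     'Drop Bank': 'High',
--     'Physical Drop': 'High'
-- }
--
-- _TIERS = [('critical', 'Critical'), ('high', 'High'), ('medium', 'Medium'), ('low', 'Low')]
--
--
-- def _first_hit(tiers, keywords, text):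
--     """Label of the first tier in tiers whose keyword list hits text, else None."""
--     if not tiers:
--         return None
--     tier, label = tiers[0]
--     if any(k.lower() in text for k in keywords[tier]):
--         return label
--     return _first_hit(tiers[1:], keywords, text)
--
--
-- def create_credit_card_risk_labels(title, description, category, price, keywords):
--     text = " ".join((title, description, category)).lower()
--     base = CREDIT_CARD_CATEGORIES.get(category)
--     if base is not None:
--         return _first_hit(_TIERS[:1], keywords, text) or base
--     return _first_hit(_TIERS, keywords, text) or 'Low'
-- ===== Notes on version B (the rewrite author's own statement) =====
-- stated objective: simpler
-- what changed: Replaces A's two copy-pasted chains of four tier loops by one recursive first-match helper over a (tier, label) table, applied to the whole table in the general branch and to its critical-only prefix in the credit-card branch (which also removes the dead base_risk == 'Medium' branch and the dead keywords['high'] subscript).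
-- crash fix: On credit-card-category inputs with no critical keyword hit and no 'high' key, A raises KeyError from a subscript whose value it never uses, while B returns the category's base risk. — e.g. on create_credit_card_risk_labels("x", "", "Carding", 1, [("critical", ["cvv"])]): A raises KeyError, B returns "Critical"
import Mathlib
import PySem

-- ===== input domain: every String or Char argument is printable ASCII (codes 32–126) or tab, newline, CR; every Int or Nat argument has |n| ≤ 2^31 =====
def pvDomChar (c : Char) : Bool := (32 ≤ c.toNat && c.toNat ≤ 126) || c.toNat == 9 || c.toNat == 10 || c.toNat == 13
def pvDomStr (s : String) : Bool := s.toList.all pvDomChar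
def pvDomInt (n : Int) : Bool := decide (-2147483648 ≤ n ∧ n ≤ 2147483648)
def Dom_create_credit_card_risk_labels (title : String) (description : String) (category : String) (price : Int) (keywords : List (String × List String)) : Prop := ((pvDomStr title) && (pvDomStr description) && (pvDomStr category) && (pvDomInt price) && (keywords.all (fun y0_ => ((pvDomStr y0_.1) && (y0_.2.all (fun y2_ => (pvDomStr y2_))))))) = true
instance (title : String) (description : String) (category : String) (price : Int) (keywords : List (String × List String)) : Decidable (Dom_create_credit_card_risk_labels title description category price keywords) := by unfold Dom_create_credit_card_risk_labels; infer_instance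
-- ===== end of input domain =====

-- B folds A's two copy-pasted tier-loop chains into one recursive first-match helper over a
-- (tier, label) table; equivalence is about the return value (no argument is mutated).

-- ===== PORT A =====
-- module constant CREDIT_CARD_CATEGORIES (a literal dict)
def pvCCC : PySem.Dict String String :=
  PySem.Dict.mk [("Cards and CVV", "Critical"), ("Carding", "Critical"), ("SSN", "Critical"),
                 ("Dump", "Critical"), ("Drop Bank", "High"), ("Physical Drop", "High")]

-- keywords['k'] raises KeyError when key k is missing; Pre_ excludes exactly those inputs,
-- so the total form 'getD … []' is exact on Pre_ (same remark for port B).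
def create_credit_card_risk_labels (title : String) (description : String) (category : String) (price : Int) (keywords : List (String × List String)) : String :=
  let text := PySem.Str.lower (PySem.Str.join " " [title, description, category])
  let kw := PySem.Dict.mk keywords
  if pvCCC.contains category then
    let base_risk := pvCCC.getD category ""
    if (kw.getD "critical" []).any (fun k => PySem.Str.isIn (PySem.Str.lower k) text) then "Critical"
    else if (kw.getD "high" []).any (fun k => PySem.Str.isIn (PySem.Str.lower k) text) then
      (if base_risk == "Medium" then "High" else base_risk)
    else base_risk
  else
    if (kw.getD "critical" []).any (fun k => PySem.Str.isIn (PySem.Str.lower k) text) then "Critical"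
    else if (kw.getD "high" []).any (fun k => PySem.Str.isIn (PySem.Str.lower k) text) then "High"
    else if (kw.getD "medium" []).any (fun k => PySem.Str.isIn (PySem.Str.lower k) text) then "Medium"
    else if (kw.getD "low" []).any (fun k => PySem.Str.isIn (PySem.Str.lower k) text) then "Low"
    else "Low"

-- ===== PORT B =====
-- module constant _TIERS of Source B
def pvTiers : List (String × String) :=
  [("critical", "Critical"), ("high", "High"), ("medium", "Medium"), ("low", "Low")]

-- helper _first_hit of Source B: label of the first tier whose keyword list hits, else None
def pvFirstHit (tiers : List (String × String)) (keywords : List (String × List String)) (text : String) : Option String :=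
  match tiers with
  | [] => none
  | (tier, label) :: rest =>
      if ((PySem.Dict.mk keywords).getD tier []).any
          (fun k => PySem.Str.isIn (PySem.Str.lower k) text) then some label
      else pvFirstHit rest keywords text

-- '_TIERS[:1]' on the literal table is 'List.take 1' (PySem slice_to); 'x or base' on a label
-- that is a non-empty string or None is 'Option.getD'.
def create_credit_card_risk_labels_alt (title : String) (description : String) (category : String) (price : Int) (keywords : List (String × List String)) : String :=
  let text := PySem.Str.lower (PySem.Str.join " " [title, description, category])
  match pvCCC.get? category with
  | some base => (pvFirstHit (pvTiers.take 1) keywords text).getD base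
  | none => (pvFirstHit pvTiers keywords text).getD "Low"

-- ===== PRECONDITION & SPEC =====
-- same hit test as the programs', restated for use in Pre_ and Raises_
def pvHit (keywords : List (String × List String)) (tier : String) (text : String) : Bool :=
  ((PySem.Dict.mk keywords).getD tier []).any (fun k => PySem.Str.isIn (PySem.Str.lower k) text)

-- Pre_ admits exactly the inputs on which Python A returns: every keywords[...] subscript A
-- actually evaluates (lazily, in A's order) must find its key; elsewhere A raises KeyError.
def Pre_create_credit_card_risk_labels (title : String) (description : String) (category : String) (price : Int) (keywords : List (String × List String)) : Prop :=
  (PySem.Dict.mk keywords).contains "critical" = true ∧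
  (if pvCCC.contains category = true then
     (pvHit keywords "critical" (PySem.Str.lower (PySem.Str.join " " [title, description, category])) = true ∨
       (PySem.Dict.mk keywords).contains "high" = true)
   else
     (pvHit keywords "critical" (PySem.Str.lower (PySem.Str.join " " [title, description, category])) = true ∨
       ((PySem.Dict.mk keywords).contains "high" = true ∧
         (pvHit keywords "high" (PySem.Str.lower (PySem.Str.join " " [title, description, category])) = true ∨
           ((PySem.Dict.mk keywords).contains "medium" = true ∧
             (pvHit keywords "medium" (PySem.Str.lower (PySem.Str.join " " [title, description, category])) = true ∨
               (PySem.Dict.mk keywords).contains "low" = true))))))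
instance (title : String) (description : String) (category : String) (price : Int) (keywords : List (String × List String)) : Decidable (Pre_create_credit_card_risk_labels title description category price keywords) := by unfold Pre_create_credit_card_risk_labels; infer_instance

def pvWitness_create_credit_card_risk_labels : String × String × String × Int × (List (String × List String)) :=
  ("gift card", "a listing", "Other", 5, [("critical", ["cvv"]), ("high", ["bank"]), ("medium", []), ("low", [])])

-- On credit-card-category inputs with no critical keyword hit and no 'high' key, A raises
-- KeyError from a subscript whose value it never uses, while B returns the category's base risk.
def Raises_create_credit_card_risk_labels (title : String) (description : String) (category : String) (price : Int) (keywords : List (String × List String)) : Prop :=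
  pvCCC.contains category = true ∧
  (PySem.Dict.mk keywords).contains "critical" = true ∧
  pvHit keywords "critical" (PySem.Str.lower (PySem.Str.join " " [title, description, category])) = false ∧
  (PySem.Dict.mk keywords).contains "high" = false
instance (title : String) (description : String) (category : String) (price : Int) (keywords : List (String × List String)) : Decidable (Raises_create_credit_card_risk_labels title description category price keywords) := by unfold Raises_create_credit_card_risk_labels; infer_instance

def pvRaiseWitness_create_credit_card_risk_labels : String × String × String × Int × (List (String × List String)) :=
  ("x", "", "Carding", 1, [("critical", ["cvv"])])
def pvRaiseWitnessOut_create_credit_card_risk_labels : String := "Critical"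

def Spec_create_credit_card_risk_labels (title : String) (description : String) (category : String) (price : Int) (keywords : List (String × List String)) (out : String) : Prop := out = create_credit_card_risk_labels_alt title description category price keywords
instance (title : String) (description : String) (category : String) (price : Int) (keywords : List (String × List String)) (out : String) : Decidable (Spec_create_credit_card_risk_labels title description category price keywords out) := by unfold Spec_create_credit_card_risk_labels; infer_instance

-- ===== CLAIM (what is proved, stated in full; the proofs are below) =====
def Claim_equal_create_credit_card_risk_labels : Prop := ∀ (title : String) (description : String) (category : String) (price : Int) (keywords : List (String × List String)), Dom_create_credit_card_risk_labels title description category price keywords → Pre_create_credit_card_risk_labels title description category price keywords → Spec_create_credit_card_risk_labels title description category price keywords (create_credit_card_risk_labels title description category price keywords)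

def Claim_raises_create_credit_card_risk_labels : Prop := (∀ (title : String) (description : String) (category : String) (price : Int) (keywords : List (String × List String)), Dom_create_credit_card_risk_labels title description category price keywords → Raises_create_credit_card_risk_labels title description category price keywords → ¬ Pre_create_credit_card_risk_labels title description category price keywords) ∧ (Dom_create_credit_card_risk_labels (pvRaiseWitness_create_credit_card_risk_labels.1) (pvRaiseWitness_create_credit_card_risk_labels.2.1) (pvRaiseWitness_create_credit_card_risk_labels.2.2.1) (pvRaiseWitness_create_credit_card_risk_labels.2.2.2.1) (pvRaiseWitness_create_credit_card_risk_labels.2.2.2.2) ∧ Raises_create_credit_card_risk_labels (pvRaiseWitness_create_credit_card_risk_labels.1) (pvRaiseWitness_create_credit_card_risk_labels.2.1) (pvRaiseWitness_create_credit_card_risk_labels.2.2.1) (pvRaiseWitness_create_credit_card_risk_labels.2.2.2.1) (pvRaiseWitness_create_credit_card_risk_labels.2.2.2.2) ∧ create_credit_card_risk_labels_alt (pvRaiseWitness_create_credit_card_risk_labels.1) (pvRaiseWitness_create_credit_card_risk_labels.2.1) (pvRaiseWitness_create_credit_card_risk_labels.2.2.1) (pvRaiseWitness_create_credit_card_risk_labels.2.2.2.1)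 (pvRaiseWitness_create_credit_card_risk_labels.2.2.2.2) = pvRaiseWitnessOut_create_credit_card_risk_labels)

-- ===== LEMMAS AND PROOFS =====
-- every value of the literal dict CREDIT_CARD_CATEGORIES is 'Critical' or 'High', never 'Medium'
theorem pvCCC_ne_medium (c b : String) (h : pvCCC.get? c = some b) : (b == "Medium") = false := by
  simp only [pvCCC, PySem.Dict.get?_mk_cons] at h
  split_ifs at h <;> simp_all [PySem.Dict.get?] <;> (subst h; decide)

-- ===== VERDICT (by name: the statement is the Claim_ definition above) =====
theorem create_credit_card_risk_labels_spec : Claim_equal_create_credit_card_risk_labels := by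
  intro title description category price keywords _ _
  unfold Spec_create_credit_card_risk_labels
  simp only [create_credit_card_risk_labels, create_credit_card_risk_labels_alt, pvFirstHit,
    pvTiers, List.take]
  rcases hcat : pvCCC.get? category with _ | base
  · have hcc : pvCCC.contains category = false := by
      simp [PySem.Dict.contains_eq_isSome_get?, hcat]
    simp only [hcc, Bool.false_eq_true, if_false]
    split_ifs <;> rfl
  · have hcc : pvCCC.contains category = true := by
      simp [PySem.Dict.contains_eq_isSome_get?, hcat]
    have hbase := PySem.Dict.getD_of_get?_eq_some pvCCC "" hcat
    simp only [hcc, if_true, hbase, pvCCC_ne_medium category base hcat,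
      Bool.false_eq_true, if_false]
    split_ifs <;> rfl

@[simp] theorem create_credit_card_risk_labels_raises : Claim_raises_create_credit_card_risk_labels := by
  unfold Claim_raises_create_credit_card_risk_labels
  refine ⟨?_, by decide⟩
  intro title description category price keywords _ hr hpre
  obtain ⟨hcat, -, hnohit, hnohigh⟩ := hr
  obtain ⟨-, hch⟩ := hpre
  rw [if_pos hcat] at hch
  rcases hch with h | h
  · rw [hnohit] at h; exact absurd h (by decide)
  · rw [hnohigh] at h; exact absurd h (by decide)
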